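-- pv_equiv track=rewrite | github.com/JonathanKBP/Data_science_estatisticas | aula.py | conta_amizade_sexo
-- ===== SOURCE A (Python) =====
-- def conta_amizade_sexo(amizades, sexo):
--   total_amigos_sexo = []
--   masculino = 0
--   feminino = 0
--
--   for i in amizades:
--     if sexo[i[0]] == 'masculino':
--       masculino += 1
--     else:
--       feminino += 1
--     if sexo[i[1]] == 'masculino':
--       masculino += 1
--     else:
--       feminino += 1
--
--   total_amigos_sexo.append(masculino)
--   total_amigos_sexo.append(feminino)
--   return total_amigos_sexo
-- ===== SOURCE B (Python) =====
-- def conta_amizade_sexo(amizades, sexo):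
--     freq = {}
--     for a, b in amizades:
--         freq[a] = freq.get(a, 0) + 1
--         freq[b] = freq.get(b, 0) + 1
--     masculino = 0
--     feminino = 0
--     for pessoa, vezes in freq.items():
--         if sexo[pessoa] == 'masculino':
--             masculino += vezes
--         else:
--             feminino += vezes
--     return [masculino, feminino]
-- ===== Notes on version B (the rewrite author's own statement) =====
-- stated objective: alternative
-- what changed: B first aggregates all friendship endpoints into a frequency dictionary (person -> number of occurrences) and then classifies each DISTINCT person once, adding their weighted count, instead of A's direct per-pair pass that looks up every endpoint individually and increments two counters.
import Mathlib
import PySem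

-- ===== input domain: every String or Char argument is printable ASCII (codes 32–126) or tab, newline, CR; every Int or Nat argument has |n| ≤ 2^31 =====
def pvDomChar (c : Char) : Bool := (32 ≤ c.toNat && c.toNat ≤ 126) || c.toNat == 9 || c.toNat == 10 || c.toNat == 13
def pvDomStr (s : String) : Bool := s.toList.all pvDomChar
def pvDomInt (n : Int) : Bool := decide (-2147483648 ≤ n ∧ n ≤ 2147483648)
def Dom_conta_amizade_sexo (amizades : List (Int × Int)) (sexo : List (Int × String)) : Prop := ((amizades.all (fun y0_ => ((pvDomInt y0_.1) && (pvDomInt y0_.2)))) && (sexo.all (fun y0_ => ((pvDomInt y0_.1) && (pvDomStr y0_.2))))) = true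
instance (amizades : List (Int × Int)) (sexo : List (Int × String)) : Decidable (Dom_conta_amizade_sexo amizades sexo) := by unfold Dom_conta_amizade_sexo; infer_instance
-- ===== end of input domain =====

-- B aggregates endpoints into a frequency dictionary first, then classifies each DISTINCT person once with a weighted count (objective: alternative algorithm).

-- ===== PORT A =====
-- the for-loop of A over amizades with the two running counters (masculino, feminino);
-- sexo is a Python dict: PySem.Dict.ofList sexo, lookup with default "" is exact under Pre_ (no KeyError)
def contaLoop (sexo : List (Int × String)) : List (Int × Int) → Int → Int → Int × Int
  | [], m, f => (m, f)
  | i :: rest, m, f =>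
    let p1 := if (PySem.Dict.ofList sexo).getD i.1 "" = "masculino" then (m + 1, f) else (m, f + 1)
    let p2 := if (PySem.Dict.ofList sexo).getD i.2 "" = "masculino" then (p1.1 + 1, p1.2) else (p1.1, p1.2 + 1)
    contaLoop sexo rest p2.1 p2.2

def conta_amizade_sexo (amizades : List (Int × Int)) (sexo : List (Int × String)) : List Int :=
  let r := contaLoop sexo amizades 0 0
  [r.1, r.2]

-- ===== PORT B =====
-- B's first loop: freq[a] = freq.get(a, 0) + 1 for both members of every pair
def freqLoop : List (Int × Int) → PySem.Dict Int Int → PySem.Dict Int Int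
  | [], d => d
  | i :: rest, d =>
    let d1 := d.insert i.1 (d.getD i.1 0 + 1)
    let d2 := d1.insert i.2 (d1.getD i.2 0 + 1)
    freqLoop rest d2

-- B's second loop: over freq.items(), adding the weighted count to one of the two counters
def classLoop (sexo : List (Int × String)) : List (Int × Int) → Int → Int → Int × Int
  | [], m, f => (m, f)
  | (pessoa, vezes) :: rest, m, f =>
    if (PySem.Dict.ofList sexo).getD pessoa "" = "masculino" then classLoop sexo rest (m + vezes) f
    else classLoop sexo rest m (f + vezes)

def conta_amizade_sexo_alt (amizades : List (Int × Int)) (sexo : List (Int × String)) : List Int :=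
  let freq := freqLoop amizades PySem.Dict.empty
  let r := classLoop sexo freq.items 0 0
  [r.1, r.2]

-- ===== PRECONDITION & SPEC =====
-- Pre_ excludes exactly the inputs on which Python A raises KeyError: a friendship member missing from sexo.
def Pre_conta_amizade_sexo (amizades : List (Int × Int)) (sexo : List (Int × String)) : Prop :=
  ∀ i ∈ amizades, i.1 ∈ sexo.map Prod.fst ∧ i.2 ∈ sexo.map Prod.fst

instance (amizades : List (Int × Int)) (sexo : List (Int × String)) : Decidable (Pre_conta_amizade_sexo amizades sexo) := by unfold Pre_conta_amizade_sexo; infer_instance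

def pvWitness_conta_amizade_sexo : (List (Int × Int)) × (List (Int × String)) :=
  ([(0, 1), (1, 2)], [(0, "masculino"), (1, "feminino"), (2, "masculino")])

def Spec_conta_amizade_sexo (amizades : List (Int × Int)) (sexo : List (Int × String)) (out : List Int) : Prop := out = conta_amizade_sexo_alt amizades sexo
instance (amizades : List (Int × Int)) (sexo : List (Int × String)) (out : List Int) : Decidable (Spec_conta_amizade_sexo amizades sexo out) := by unfold Spec_conta_amizade_sexo; infer_instance

-- ===== CLAIM (what is proved, stated in full; the proofs are below) =====
def Claim_equal_conta_amizade_sexo : Prop := ∀ (amizades : List (Int × Int)) (sexo : List (Int × String)), Dom_conta_amizade_sexo amizades sexo → Pre_conta_amizade_sexo amizades sexo → Spec_conta_amizade_sexo amizades sexo (conta_amizade_sexo amizades sexo)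

-- ===== LEMMAS AND PROOFS =====
-- the flattened list of all friendship endpoints
def pvFlat (l : List (Int × Int)) : List Int := l.flatMap fun i => [i.1, i.2]

-- the gender predicate both ports test
def pvMasc (sexo : List (Int × String)) (x : Int) : Bool :=
  decide ((PySem.Dict.ofList sexo).getD x "" = "masculino")

lemma contaLoop_eq (sexo : List (Int × String)) (l : List (Int × Int)) (m f : Int) :
    contaLoop sexo l m f =
      (m + ((pvFlat l).countP (pvMasc sexo) : Int),
       f + ((pvFlat l).countP (fun x => !pvMasc sexo x) : Int)) := by
  induction l generalizing m f with
  | nil => simp [contaLoop, pvFlat]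
  | cons i rest ih =>
    simp only [contaLoop]
    by_cases h1 : (PySem.Dict.ofList sexo).getD i.1 "" = "masculino" <;>
      by_cases h2 : (PySem.Dict.ofList sexo).getD i.2 "" = "masculino" <;>
        simp only [h1, h2, if_pos, if_neg, not_false_iff, ih, pvFlat,
          List.flatMap_cons, List.countP_append, List.countP_cons, List.countP_nil, pvMasc,
          Prod.mk.injEq, decide_eq_true_eq] <;>
        constructor <;> simp <;> (try push_cast) <;> ring

lemma freqLoop_eq_counter (l : List (Int × Int)) :
    freqLoop l PySem.Dict.empty = PySem.Dict.counter (pvFlat l) := by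
  rw [← PySem.Dict.foldl_insert_getD_add_one_eq_counter]
  suffices h : ∀ (d : PySem.Dict Int Int),
      freqLoop l d = (pvFlat l).foldl (fun d x => d.insert x (d.getD x 0 + 1)) d from h _
  induction l with
  | nil => intro d; simp [freqLoop, pvFlat]
  | cons i rest ih =>
    intro d
    simp only [freqLoop, pvFlat, List.flatMap_cons, List.cons_append, List.nil_append,
      List.foldl_cons]
    exact ih _

lemma classLoop_shift (sexo : List (Int × String)) (pairs : List (Int × Int)) (m f : Int) :
    classLoop sexo pairs m f =
      (m + (pairs.map (fun q => if pvMasc sexo q.1 then q.2 else 0)).sum,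
       f + (pairs.map (fun q => if pvMasc sexo q.1 then 0 else q.2)).sum) := by
  induction pairs generalizing m f with
  | nil => simp [classLoop]
  | cons q rest ih =>
    obtain ⟨pessoa, vezes⟩ := q
    simp only [classLoop]
    by_cases h : (PySem.Dict.ofList sexo).getD pessoa "" = "masculino" <;>
      simp only [h, if_pos, if_neg, not_false_iff, ih, List.map_cons,
        List.sum_cons, pvMasc, decide_eq_true_eq, Prod.mk.injEq] <;>
      constructor <;> ring

lemma sum_ite_filter {α : Type} (l : List α) (p : α → Bool) (g : α → Int) :
    (l.map (fun k => if p k then g k else 0)).sum = ((l.filter p).map g).sum := by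
  induction l with
  | nil => rfl
  | cons a t ih =>
    by_cases h : p a <;> simp [h, ih]

lemma sum_count_ofSet (xs : List Int) (p : Int → Bool) :
    ((PySem.Set.ofList xs).map (fun k => if p k then (xs.count k : Int) else 0)).sum
      = (xs.countP p : Int) := by
  have hperm : (PySem.Set.ofList xs).Perm xs.dedup :=
    (List.perm_ext_iff_of_nodup (PySem.Set.nodup_ofList xs) xs.nodup_dedup).mpr
      (fun a => by rw [PySem.Set.mem_ofList, List.mem_dedup])
  rw [(hperm.map _).sum_eq, sum_ite_filter,
    show (fun k => (xs.count k : Int)) = (fun n : ℕ => (n : Int)) ∘ xs.count from rfl,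
    ← List.map_map, ← Nat.cast_list_sum, List.sum_map_count_dedup_filter_eq_countP]

lemma items_counter_sum (xs : List Int) (p : Int → Bool) :
    ((PySem.Dict.counter xs).items.map (fun q => if p q.1 then q.2 else 0)).sum
      = (xs.countP p : Int) := by
  rw [PySem.Dict.items_counter, List.map_map]
  exact sum_count_ofSet xs p

-- ===== VERDICT (by name: the statement is the Claim_ definition above) =====
theorem conta_amizade_sexo_spec : Claim_equal_conta_amizade_sexo := by
  intro amizades sexo _ _
  unfold Spec_conta_amizade_sexo conta_amizade_sexo conta_amizade_sexo_alt
  simp only [contaLoop_eq, freqLoop_eq_counter, classLoop_shift]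
  have h1 := items_counter_sum (pvFlat amizades) (pvMasc sexo)
  have h2 := items_counter_sum (pvFlat amizades) (fun x => !pvMasc sexo x)
  have h3 : ((PySem.Dict.counter (pvFlat amizades)).items.map
      (fun q => if pvMasc sexo q.1 then 0 else q.2)).sum
      = ((pvFlat amizades).countP (fun x => !pvMasc sexo x) : Int) := by
    rw [← h2]
    apply congrArg List.sum
    apply List.map_congr_left
    intro q _
    cases h : pvMasc sexo q.1 <;> simp
  simp [h1, h3]
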